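-- pv_equiv track=rewrite | github.com/MouradKarrakchou/CompetitivePrograming | SiConc/Conc1.py | littleWord
-- ===== SOURCE A (Python) =====
-- def littleWord(l):
--     smallestWord = l[0]
--     minlen = len(l[0])
--     i = 0
--     for k in l:
--         if len(k) < minlen:
--             minlen = len(k)
--             smallestWord = k
--         elif len(k) == minlen:
--             if k < smallestWord:
--                 smallestWord = k
--         i += 1
--     return smallestWord
-- ===== SOURCE B (Python) =====
-- def littleWord(l):
--     return sorted(l, key=lambda w: (len(w), w))[0]
-- ===== Notes on version B (the rewrite author's own statement) =====
-- stated objective: idiomatic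
-- what changed: Replaces the explicit running-minimum scan (with its unused counter) by a one-line sort by the tuple key (len(w), w) followed by taking the first element.
import Mathlib
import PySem

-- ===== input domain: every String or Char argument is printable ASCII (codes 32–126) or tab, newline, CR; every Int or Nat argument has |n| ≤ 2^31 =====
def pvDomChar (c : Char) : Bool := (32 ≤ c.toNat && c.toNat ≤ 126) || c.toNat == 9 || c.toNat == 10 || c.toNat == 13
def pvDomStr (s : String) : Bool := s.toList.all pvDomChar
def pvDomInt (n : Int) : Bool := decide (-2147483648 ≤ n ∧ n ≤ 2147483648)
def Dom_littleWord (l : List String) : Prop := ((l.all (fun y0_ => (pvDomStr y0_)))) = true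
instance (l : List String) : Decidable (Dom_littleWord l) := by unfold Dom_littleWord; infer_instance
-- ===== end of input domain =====

-- B replaces A's explicit running-minimum scan by sorting on the tuple key (len(w), w)
-- and taking the first element (idiomatic, not faster). Both raise IndexError on [].

-- ===== PORT A =====
def littleWord (l : List String) : String :=
  match PySem.List.pyGet? l 0 with
  | none => ""   -- l[0] raises IndexError on []; excluded by Pre_littleWord
  | some w0 =>
      (l.foldl (fun (st : String × Int × Int) k =>
          if PySem.Str.len k < st.2.1 then (k, PySem.Str.len k, st.2.2 + 1)
          else if PySem.Str.len k == st.2.1 then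
            (if PySem.Chars.strLt k.toList st.1.toList then (k, st.2.1, st.2.2 + 1)
             else (st.1, st.2.1, st.2.2 + 1))
          else (st.1, st.2.1, st.2.2 + 1))
        (w0, PySem.Str.len w0, 0)).1

-- ===== PORT B =====
-- sorted(l, key=lambda w: (len(w), w))[0]; Python str '<' is '<' on .toList (PYSEM.md)
def littleWord_alt (l : List String) : String :=
  match PySem.List.pyGet? (PySem.List.sorted2 l (fun w => PySem.Str.len w) (fun w => w.toList) false) 0 with
  | none => ""   -- [0] raises IndexError on []; excluded by Pre_littleWord
  | some w => w

-- ===== PRECONDITION & SPEC =====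
-- Pre_ excludes only the empty list, where both A and B raise IndexError.
def Pre_littleWord (l : List String) : Prop := l ≠ []
instance (l : List String) : Decidable (Pre_littleWord l) := by unfold Pre_littleWord; infer_instance
def pvWitness_littleWord : List String := ["ab", "b", "cd"]

def Spec_littleWord (l : List String) (out : String) : Prop := out = littleWord_alt l
instance (l : List String) (out : String) : Decidable (Spec_littleWord l out) := by unfold Spec_littleWord; infer_instance

-- ===== CLAIM (what is proved, stated in full; the proofs are below) =====
def Claim_equal_littleWord : Prop := ∀ (l : List String), Dom_littleWord l → Pre_littleWord l → Spec_littleWord l (littleWord l)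

-- ===== LEMMAS AND PROOFS =====

-- the strict "better" order both programs use: shorter, or equally long and lexicographically smaller
def pvBef (a b : String) : Bool :=
  decide (PySem.Str.len a < PySem.Str.len b) ||
    (!decide (PySem.Str.len b < PySem.Str.len a) && decide (a.toList < b.toList))

def pvMinFold (a : String) (t : List String) : String :=
  t.foldl (fun m k => if pvBef k m then k else m) a

-- one step of A's loop, given its invariant minlen = len(smallestWord)
theorem pvStepA_eq (sw k : String) (i : Int) :
    (if PySem.Str.len k < PySem.Str.len sw then (k, PySem.Str.len k, i + 1)
     else if PySem.Str.len k == PySem.Str.len sw then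
       (if PySem.Chars.strLt k.toList sw.toList then (k, PySem.Str.len sw, i + 1)
        else (sw, PySem.Str.len sw, i + 1))
     else (sw, PySem.Str.len sw, i + 1))
    = ((if pvBef k sw then k else sw),
       PySem.Str.len (if pvBef k sw then k else sw), i + 1) := by
  rcases lt_trichotomy (PySem.Str.len k) (PySem.Str.len sw) with h | h | h
  · have hb : pvBef k sw = true := by
      unfold pvBef; rw [decide_eq_true h]; simp
    rw [if_pos h, if_pos hb]
  · have h1 : ¬ PySem.Str.len k < PySem.Str.len sw := by omega
    have h2 : (PySem.Str.len k == PySem.Str.len sw) = true := beq_iff_eq.mpr h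
    have h3 : ¬ PySem.Str.len sw < PySem.Str.len k := by omega
    have hb : pvBef k sw = decide (k.toList < sw.toList) := by
      unfold pvBef
      rw [decide_eq_false h1, decide_eq_false h3]
      simp
    rw [if_neg h1, if_pos h2, hb]
    by_cases hs : k.toList < sw.toList
    · rw [if_pos (by simpa [PySem.Chars.strLt] using hs),
         if_pos (decide_eq_true hs)]
      rw [h]
    · rw [if_neg (by simpa [PySem.Chars.strLt] using hs),
         if_neg (by simp [decide_eq_false hs])]
  · have h1 : ¬ PySem.Str.len k < PySem.Str.len sw := by omega
    have h2 : (PySem.Str.len k == PySem.Str.len sw) = false :=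
      beq_eq_false_iff_ne.mpr (by omega)
    have hb : pvBef k sw = false := by
      unfold pvBef
      rw [decide_eq_false h1, decide_eq_true h]
      simp
    rw [if_neg h1, if_neg (by rw [h2]; exact Bool.false_ne_true),
       if_neg (by rw [hb]; exact Bool.false_ne_true)]

-- A's loop is the running minimum under pvBef
theorem littleWord_fold_eq (t : List String) : ∀ (sw : String) (i : Int),
    (t.foldl (fun (st : String × Int × Int) k =>
        if PySem.Str.len k < st.2.1 then (k, PySem.Str.len k, st.2.2 + 1)
        else if PySem.Str.len k == st.2.1 then
          (if PySem.Chars.strLt k.toList st.1.toList then (k, st.2.1, st.2.2 + 1)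
           else (st.1, st.2.1, st.2.2 + 1))
        else (st.1, st.2.1, st.2.2 + 1))
      (sw, PySem.Str.len sw, i)).1 = pvMinFold sw t := by
  induction t with
  | nil => intro sw i; rfl
  | cons k t ih =>
    intro sw i
    rw [List.foldl_cons]
    show (t.foldl _ (if PySem.Str.len k < PySem.Str.len sw then (k, PySem.Str.len k, i + 1)
      else if PySem.Str.len k == PySem.Str.len sw then
        (if PySem.Chars.strLt k.toList sw.toList then (k, PySem.Str.len sw, i + 1)
         else (sw, PySem.Str.len sw, i + 1))
      else (sw, PySem.Str.len sw, i + 1))).1 = _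
    rw [pvStepA_eq sw k i]
    exact ih (if pvBef k sw then k else sw) (i + 1)

theorem insertBy_ne_nil (x : String) (acc : List String) :
    PySem.List.insertBy pvBef x acc ≠ [] := by
  cases acc with
  | nil => simp [PySem.List.insertBy]
  | cons y ys => simp only [PySem.List.insertBy]; split <;> simp

-- head of the insertion-sort fold is the running minimum under pvBef
theorem foldl_insertBy_head (t : List String) : ∀ (acc : List String), acc ≠ [] →
    (t.foldl (fun acc x => PySem.List.insertBy pvBef x acc) acc).headD "" =
      pvMinFold (acc.headD "") t := by
  induction t with
  | nil => intro acc _; rfl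
  | cons k t ih =>
    intro acc hacc
    cases acc with
    | nil => exact absurd rfl hacc
    | cons y ys =>
      rw [List.foldl_cons]
      have hhd : (PySem.List.insertBy pvBef k (y :: ys)).headD "" = if pvBef k y then k else y := by
        simp only [PySem.List.insertBy]; split <;> simp
      rw [ih (PySem.List.insertBy pvBef k (y :: ys)) (insertBy_ne_nil k (y :: ys)), hhd]
      rfl

theorem sorted2_head (a : String) (t : List String) :
    (PySem.List.sorted2 (a :: t) (fun w => PySem.Str.len w) (fun w => w.toList) false).headD ""
      = pvMinFold a t := by
  have h : PySem.List.sorted2 (a :: t) (fun w => PySem.Str.len w) (fun w => w.toList) false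
      = t.foldl (fun acc x => PySem.List.insertBy pvBef x acc) [a] := rfl
  rw [h, foldl_insertBy_head t [a] (by simp)]
  rfl

-- ===== VERDICT (by name: the statement is the Claim_ definition above) =====
theorem littleWord_spec : Claim_equal_littleWord := by
  unfold Claim_equal_littleWord
  intro l _ hpre
  unfold Spec_littleWord Pre_littleWord at *
  cases l with
  | nil => exact absurd rfl hpre
  | cons a t =>
    have hA : littleWord (a :: t) = pvMinFold a t := by
      unfold littleWord
      have hget : PySem.List.pyGet? (a :: t) 0 = some a := by
        simp [PySem.List.pyGet?, PySem.List.pyIdx?]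
      rw [hget]
      show (List.foldl (fun (st : String × Int × Int) k =>
          if PySem.Str.len k < st.2.1 then (k, PySem.Str.len k, st.2.2 + 1)
          else if PySem.Str.len k == st.2.1 then
            (if PySem.Chars.strLt k.toList st.1.toList then (k, st.2.1, st.2.2 + 1)
             else (st.1, st.2.1, st.2.2 + 1))
          else (st.1, st.2.1, st.2.2 + 1)) (a, PySem.Str.len a, 0) (a :: t)).1 = pvMinFold a t
      rw [littleWord_fold_eq (a :: t) a 0]
      show pvMinFold a (a :: t) = pvMinFold a t
      unfold pvMinFold
      rw [List.foldl_cons, ite_self]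
    have hB : littleWord_alt (a :: t) = pvMinFold a t := by
      unfold littleWord_alt
      obtain ⟨h0, s, hsrt⟩ : ∃ h0 s,
          PySem.List.sorted2 (a :: t) (fun w => PySem.Str.len w) (fun w => w.toList) false = h0 :: s := by
        cases hh : PySem.List.sorted2 (a :: t) (fun w => PySem.Str.len w) (fun w => w.toList) false with
        | nil =>
          have hp := PySem.List.sorted2_perm (a :: t) (fun w => PySem.Str.len w) (fun w => w.toList) false
          rw [hh] at hp
          exact absurd hp.symm.eq_nil (by simp)
        | cons h0 s => exact ⟨h0, s, rfl⟩
      have hb := sorted2_head a t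
      rw [hsrt] at hb ⊢
      have hget : PySem.List.pyGet? (h0 :: s) 0 = some h0 := by
        simp [PySem.List.pyGet?, PySem.List.pyIdx?]
      rw [hget]
      simpa using hb
    rw [hA, hB]
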